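-- pv_equiv track=rewrite | github.com/aleksejcupic/python-cs1-hw | HW8/magic_square_with_mod.py | modfill
-- ===== SOURCE A (Python) =====
-- def modfill(size):
--     magic_square=[[0 for x in range(size)] for y in range(size)]
--     row=0
--     col=size//2
--     magic_square[row][col]=1
--     for num in range(2,size**2+1):
--         col=(col+1)%size
--         row=(row-1)%size
--         if col>=0 and col<=size-1 and row>=0 and row<=size-1:
--             if magic_square[row][col]==0:
--                 magic_square[row][col]=num
--             else:
--                 row=(row+2)%size
--                 col=(col-1)%size
--                 magic_square[row][col]=num
--     return magic_square
-- ===== SOURCE B (Python) =====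
-- def modfill(size):
--     # Siamese-method magic square computed by a direct closed form per cell:
--     # with m = size // 2, cell (i, j) holds q*size + p + 1 where
--     # q = (i + j - m) % size and p = (2*q - i) % size.
--     m = size // 2
--     return [
--         [((i + j - m) % size) * size + (2 * ((i + j - m) % size) - i) % size + 1
--          for j in range(size)]
--         for i in range(size)
--     ]
-- ===== Notes on version B (the rewrite author's own statement) =====
-- stated objective: simpler
-- what changed: Replaces the stateful diagonal walk (row/col cursors, collision branch, cell-by-cell mutation) with a direct closed-form formula that writes each cell once in row-major order.
-- outside the precondition, e.g. on modfill(0): A raises IndexError, B returns []; on modfill(-3): A raises IndexError, B returns []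
import Mathlib
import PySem

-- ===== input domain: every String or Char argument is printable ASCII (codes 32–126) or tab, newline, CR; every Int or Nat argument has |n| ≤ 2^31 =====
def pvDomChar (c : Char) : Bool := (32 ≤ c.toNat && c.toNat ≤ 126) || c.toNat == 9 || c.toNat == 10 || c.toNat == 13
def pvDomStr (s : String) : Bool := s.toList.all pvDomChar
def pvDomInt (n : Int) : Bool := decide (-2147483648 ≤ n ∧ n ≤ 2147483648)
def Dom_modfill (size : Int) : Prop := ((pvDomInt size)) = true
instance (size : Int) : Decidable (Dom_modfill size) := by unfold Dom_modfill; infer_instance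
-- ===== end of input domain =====

-- B replaces A's stateful Siamese diagonal walk by a per-cell closed form (objective: simpler).

-- ===== PORT A =====
-- one iteration of A's for-loop; state = (magic_square, row, col)
def modfillStep (size : Int) (st : (List (List Int)) × Int × Int) (num : Int) :
    (List (List Int)) × Int × Int :=
  let ms := st.1
  let row0 := st.2.1
  let col0 := st.2.2
  let col := PySem.Int.mod (col0 + 1) size
  let row := PySem.Int.mod (row0 - 1) size
  if col ≥ 0 ∧ col ≤ size - 1 ∧ row ≥ 0 ∧ row ≤ size - 1 then
    if PySem.List.pyGetD (PySem.List.pyGetD ms row []) col 0 = 0 then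
      (PySem.List.pySetD ms row (PySem.List.pySetD (PySem.List.pyGetD ms row []) col num), row, col)
    else
      let row2 := PySem.Int.mod (row + 2) size
      let col2 := PySem.Int.mod (col - 1) size
      (PySem.List.pySetD ms row2 (PySem.List.pySetD (PySem.List.pyGetD ms row2 []) col2 num), row2, col2)
  else (ms, row, col)

def modfill (size : Int) : List (List Int) :=
  let magic0 : List (List Int) :=
    (PySem.List.pyRange 0 size 1).map (fun _y => (PySem.List.pyRange 0 size 1).map (fun _x => (0 : Int)))
  let row : Int := 0
  let col : Int := PySem.Int.floordiv size 2
  -- magic_square[row][col] = 1 : Python raises IndexError here when size ≤ 0; Pre_modfill excludes that,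
  -- and pySetD/pyGetD are exact for the in-range indices that remain.
  let magic1 := PySem.List.pySetD magic0 row (PySem.List.pySetD (PySem.List.pyGetD magic0 row []) col 1)
  ((PySem.List.pyRange 2 (size ^ 2 + 1) 1).foldl (modfillStep size) (magic1, row, col)).1

-- ===== PORT B =====
def modfill_alt (size : Int) : List (List Int) :=
  let m := PySem.Int.floordiv size 2
  (PySem.List.pyRange 0 size 1).map (fun i =>
    (PySem.List.pyRange 0 size 1).map (fun j =>
      (PySem.Int.mod (i + j - m) size) * size
        + PySem.Int.mod (2 * PySem.Int.mod (i + j - m) size - i) size + 1))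

-- ===== PRECONDITION & SPEC =====
-- Pre_ excludes size ≤ 0, where A raises IndexError (it indexes into an empty grid).
def Pre_modfill (size : Int) : Prop := 1 ≤ size
instance (size : Int) : Decidable (Pre_modfill size) := by unfold Pre_modfill; infer_instance
def pvWitness_modfill : Int := 3

def Spec_modfill (size : Int) (out : List (List Int)) : Prop := out = modfill_alt size
instance (size : Int) (out : List (List Int)) : Decidable (Spec_modfill size out) := by
  unfold Spec_modfill; infer_instance

-- ===== CLAIM (what is proved, stated in full; the proofs are below) =====
def Claim_equal_modfill : Prop :=
  ∀ (size : Int), Dom_modfill size → Pre_modfill size → Spec_modfill size (modfill size)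

-- ===== LEMMAS AND PROOFS =====

-- the closed-form value of cell (i, j)  (for 0 < n, PySem's floor-mod/div agree with Lean's % and /)
def mVal (n i j : Int) : Int :=
  ((i + j - n / 2) % n) * n + (2 * ((i + j - n / 2) % n) - i) % n + 1

-- the position of value v in the square: row mI, column mJ
def mI (n v : Int) : Int := (2 * ((v - 1) / n) - (v - 1) % n) % n
def mJ (n v : Int) : Int := ((v - 1) / n + n / 2 - mI n v) % n

-- the grid after all values ≤ k have been placed
def gridAt (n k : Int) : List (List Int) :=
  (PySem.List.pyRange 0 n 1).map (fun i =>
    (PySem.List.pyRange 0 n 1).map (fun j => if mVal n i j ≤ k then mVal n i j else 0))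

theorem emod_shift (n x c : Int) : (x % n + c) % n = (x + c) % n := by
  have h : x % n + c = x + c + n * (-(x / n)) := by rw [Int.emod_def]; ring
  rw [h, Int.add_mul_emod_self_left]

theorem emod_shift_neg (n x c : Int) : (c - x % n) % n = (c - x) % n := by
  have h : c - x % n = c - x + n * (x / n) := by rw [Int.emod_def]; ring
  rw [h, Int.add_mul_emod_self_left]

theorem mVal_bounds {n : Int} (hn : 0 < n) (i j : Int) :
    1 ≤ mVal n i j ∧ mVal n i j ≤ n ^ 2 := by
  unfold mVal
  have hne : n ≠ 0 := by omega
  have hq0 := Int.emod_nonneg (i + j - n / 2) hne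
  have hq1 := Int.emod_lt_of_pos (i + j - n / 2) hn
  have hp0 := Int.emod_nonneg (2 * ((i + j - n / 2) % n) - i) hne
  have hp1 := Int.emod_lt_of_pos (2 * ((i + j - n / 2) % n) - i) hn
  constructor
  · nlinarith
  · have hnn : n ^ 2 = n * n := sq n
    nlinarith

theorem mIJ_bounds {n : Int} (hn : 0 < n) (v : Int) :
    0 ≤ mI n v ∧ mI n v < n ∧ 0 ≤ mJ n v ∧ mJ n v < n := by
  have hne : n ≠ 0 := by omega
  exact ⟨Int.emod_nonneg _ hne, Int.emod_lt_of_pos _ hn,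
         Int.emod_nonneg _ hne, Int.emod_lt_of_pos _ hn⟩

theorem mVal_mIJ {n v : Int} (hn : 0 < n) (hv : 1 ≤ v) (hv' : v ≤ n ^ 2) :
    mVal n (mI n v) (mJ n v) = v := by
  have hne : n ≠ 0 := by omega
  have hqp : n * ((v - 1) / n) + (v - 1) % n = v - 1 := Int.ediv_add_emod (v - 1) n
  have hp0 : 0 ≤ (v - 1) % n := Int.emod_nonneg _ hne
  have hp1 : (v - 1) % n < n := Int.emod_lt_of_pos _ hn
  have hq0 : 0 ≤ (v - 1) / n := Int.ediv_nonneg (by omega) (by omega)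
  have hsq : n ^ 2 = n * n := sq n
  have hq1 : (v - 1) / n < n := by
    by_contra h
    push_neg at h
    have h2 : n * n ≤ n * ((v - 1) / n) := mul_le_mul_of_nonneg_left h (le_of_lt hn)
    linarith
  have hQ : (mI n v + mJ n v - n / 2) % n = (v - 1) / n := by
    have h1 : mI n v + mJ n v - n / 2
        = ((v - 1) / n + n / 2 - mI n v) % n + (mI n v - n / 2) := by
      unfold mJ; ring
    rw [h1, emod_shift,
        show (v - 1) / n + n / 2 - mI n v + (mI n v - n / 2) = (v - 1) / n from by ring]
    exact Int.emod_eq_of_lt hq0 hq1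
  have hP : (2 * ((v - 1) / n) - mI n v) % n = (v - 1) % n := by
    unfold mI
    rw [emod_shift_neg,
        show 2 * ((v - 1) / n) - (2 * ((v - 1) / n) - (v - 1) % n) = (v - 1) % n from by ring]
    exact Int.emod_emod_of_dvd _ dvd_rfl
  unfold mVal
  rw [hQ, hP]
  have hcomm : (v - 1) / n * n = n * ((v - 1) / n) := mul_comm _ _
  linarith

theorem mIJ_of_mVal {n i j v : Int} (hn : 0 < n) (hi : 0 ≤ i) (hi' : i < n)
    (hj : 0 ≤ j) (hj' : j < n) (hval : mVal n i j = v) : mI n v = i ∧ mJ n v = j := by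
  have hne : n ≠ 0 := by omega
  unfold mVal at hval
  set q := (i + j - n / 2) % n with hqdef
  set p := (2 * q - i) % n with hpdef
  have hp0 : 0 ≤ p := Int.emod_nonneg _ hne
  have hp1 : p < n := Int.emod_lt_of_pos _ hn
  have hv1 : v - 1 = p + n * q := by rw [← hval]; ring
  have hdiv : (v - 1) / n = q := by
    rw [hv1, Int.add_mul_ediv_left p q hne, Int.ediv_eq_zero_of_lt hp0 hp1]; ring
  have hmod : (v - 1) % n = p := by
    rw [hv1, Int.add_mul_emod_self_left]
    exact Int.emod_eq_of_lt hp0 hp1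
  have hmi : mI n v = i := by
    unfold mI
    rw [hdiv, hmod, hpdef, emod_shift_neg,
        show 2 * q - (2 * q - i) = i from by ring]
    exact Int.emod_eq_of_lt hi hi'
  refine ⟨hmi, ?_⟩
  unfold mJ
  rw [hdiv, hmi, hqdef,
      show (i + j - n / 2) % n + n / 2 - i = (i + j - n / 2) % n + (n / 2 - i) from by ring,
      emod_shift,
      show i + j - n / 2 + (n / 2 - i) = j from by ring]
  exact Int.emod_eq_of_lt hj hj' 

theorem set_map_pyRange {α : Type} (n : Int) (f g : Int → α) (a : Int) (v : α)
    (ha0 : 0 ≤ a) (han : a < n)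
    (hg : ∀ i, 0 ≤ i → i < n → g i = if i = a then v else f i) :
    ((PySem.List.pyRange 0 n 1).map f).set a.toNat v = (PySem.List.pyRange 0 n 1).map g := by
  apply List.ext_getElem
  · simp
  · intro u h1 h2
    have hu : u < (n - 0).toNat := by
      simpa [PySem.List.length_pyRange_one] using h2
    have hun : (u : Int) < n := by omega
    have hval : (PySem.List.pyRange 0 n 1)[u]'(by simpa [PySem.List.length_pyRange_one]) = (u : Int) := by
      rw [PySem.List.getElem_pyRange_one]; ring
    rw [List.getElem_set, List.getElem_map, List.getElem_map, hval,
        hg (u : Int) (by positivity) hun]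
    by_cases hcase : u = a.toNat
    · simp [hcase, show ((a.toNat : Int)) = a from by omega]
    · have h3 : ¬ ((u : Int) = a) := by omega
      have h4 : ¬ (a.toNat = u) := by omega
      simp [h3, h4]

theorem gridAt_row {n k a : Int} (ha0 : 0 ≤ a) (han : a < n) :
    PySem.List.pyGetD (gridAt n k) a [] =
      (PySem.List.pyRange 0 n 1).map (fun j => if mVal n a j ≤ k then mVal n a j else 0) := by
  unfold gridAt
  exact PySem.List.pyGetD_map_pyRange_of_nonneg _ n a [] ha0 han

theorem gridAt_write {n k : Int} (hn : 0 < n) (hk0 : 0 ≤ k) (hk' : k < n ^ 2) :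
    PySem.List.pySetD (gridAt n k) (mI n (k + 1))
      (PySem.List.pySetD (PySem.List.pyGetD (gridAt n k) (mI n (k + 1)) []) (mJ n (k + 1)) (k + 1))
    = gridAt n (k + 1) := by
  obtain ⟨ha0, ha1, hb0, hb1⟩ := mIJ_bounds hn (k + 1)
  have hsq : n ^ 2 = n * n := sq n
  have hval_ab : mVal n (mI n (k + 1)) (mJ n (k + 1)) = k + 1 := mVal_mIJ hn (by omega) (by linarith)
  rw [gridAt_row ha0 ha1, PySem.List.pySetD_of_nonneg (h := hb0), PySem.List.pySetD_of_nonneg (h := ha0)]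
  have hrow :
      ((PySem.List.pyRange 0 n 1).map
          (fun j => if mVal n (mI n (k + 1)) j ≤ k then mVal n (mI n (k + 1)) j else 0)).set
        (mJ n (k + 1)).toNat (k + 1)
      = (PySem.List.pyRange 0 n 1).map
          (fun j => if mVal n (mI n (k + 1)) j ≤ k + 1 then mVal n (mI n (k + 1)) j else 0) := by
    apply set_map_pyRange n _ _ _ _ hb0 hb1
    intro j hj0 hj1
    by_cases hjb : j = mJ n (k + 1)
    · simp [hjb, hval_ab]
    · rw [if_neg hjb]
      have hne2 : mVal n (mI n (k + 1)) j ≠ k + 1 := fun h =>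
        hjb ((mIJ_of_mVal hn ha0 ha1 hj0 hj1 h).2).symm
      by_cases hle : mVal n (mI n (k + 1)) j ≤ k
      · rw [if_pos (by omega), if_pos hle]
      · rw [if_neg (by omega), if_neg hle]
  rw [hrow]
  show _ = gridAt n (k + 1)
  unfold gridAt
  apply set_map_pyRange n _ _ _ _ ha0 ha1
  intro i hi0 hi1
  by_cases hia : i = mI n (k + 1)
  · simp [hia]
  · rw [if_neg hia]
    apply List.map_congr_left
    intro j hjmem
    obtain ⟨hj0, hj1⟩ : 0 ≤ j ∧ j < n := by
      have := (PySem.List.mem_pyRange_one).mp hjmem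
      omega
    have hne2 : mVal n i j ≠ k + 1 := fun h =>
      hia ((mIJ_of_mVal hn hi0 hi1 hj0 hj1 h).1).symm
    by_cases hle : mVal n i j ≤ k
    · rw [if_pos (by omega), if_pos hle]
    · rw [if_neg (by omega), if_neg hle]

theorem step_lemma {n : Int} (hn : 1 ≤ n) {k : Int} (hk : 1 ≤ k) (hk' : k < n ^ 2) :
    modfillStep n (gridAt n k, mI n k, mJ n k) (k + 1)
      = (gridAt n (k + 1), mI n (k + 1), mJ n (k + 1)) := by
  have hn0 : 0 < n := by omega
  have hne : n ≠ 0 := by omega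
  have hqp : n * ((k - 1) / n) + (k - 1) % n = k - 1 := Int.ediv_add_emod _ _
  set q := (k - 1) / n with hqdef
  set p := (k - 1) % n with hpdef
  have hp0 : 0 ≤ p := Int.emod_nonneg _ hne
  have hp1 : p < n := Int.emod_lt_of_pos _ hn0
  have hq0 : 0 ≤ q := Int.ediv_nonneg (by omega) (by omega)
  have hsq : n ^ 2 = n * n := sq n
  have hq1 : q < n := by
    by_contra h
    push_neg at h
    have := mul_le_mul_of_nonneg_left h (le_of_lt hn0)
    linarith
  have hIk : mI n k = (2 * q - p) % n := by
    unfold mI; rw [← hqdef, ← hpdef]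
  have hJk : mJ n k = (q + n / 2 - mI n k) % n := by
    unfold mJ; rw [← hqdef]
  have hrowA : (mI n k - 1) % n = (2 * q - p - 1) % n := by
    rw [show mI n k - 1 = (2 * q - p) % n + (-1) from by rw [hIk]; ring, emod_shift,
        show 2 * q - p + (-1) = 2 * q - p - 1 from by ring]
  have hcolA : (mJ n k + 1) % n = (n / 2 - q + p + 1) % n := by
    rw [show mJ n k + 1 = (q + n / 2 - mI n k) % n + 1 from by rw [hJk], emod_shift, hIk,
        show q + n / 2 - (2 * q - p) % n + 1 = (q + n / 2 + 1) - (2 * q - p) % n from by ring,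
        emod_shift_neg,
        show q + n / 2 + 1 - (2 * q - p) = n / 2 - q + p + 1 from by ring]
  simp only [modfillStep, PySem.Int.mod_eq_emod_of_pos hn0]
  rw [if_pos ⟨Int.emod_nonneg _ hne, by have := Int.emod_lt_of_pos (mJ n k + 1) hn0; omega,
              Int.emod_nonneg _ hne, by have := Int.emod_lt_of_pos (mI n k - 1) hn0; omega⟩]
  by_cases hpA : p < n - 1
  · -- mid-run step: the target cell is still empty
    have hk1 : k = (p + 1) + n * q := by linarith
    have hdivA : k / n = q := by
      rw [hk1, Int.add_mul_ediv_left _ _ hne, Int.ediv_eq_zero_of_lt (by omega) (by omega)]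
      ring
    have hmodA : k % n = p + 1 := by
      rw [hk1, Int.add_mul_emod_self_left]
      exact Int.emod_eq_of_lt (by omega) (by omega)
    have hIA : mI n (k + 1) = (2 * q - p - 1) % n := by
      unfold mI
      simp only [add_sub_cancel_right]
      rw [hdivA, hmodA, show 2 * q - (p + 1) = 2 * q - p - 1 from by ring]
    have hJA : mJ n (k + 1) = (n / 2 - q + p + 1) % n := by
      unfold mJ
      simp only [add_sub_cancel_right]
      rw [hdivA, hIA,
          show q + n / 2 - (2 * q - p - 1) % n = (q + n / 2) - (2 * q - p - 1) % n from by ring,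
          emod_shift_neg,
          show q + n / 2 - (2 * q - p - 1) = n / 2 - q + p + 1 from by ring]
    rw [show (mI n k - 1) % n = mI n (k + 1) from by rw [hrowA, hIA],
        show (mJ n k + 1) % n = mJ n (k + 1) from by rw [hcolA, hJA]]
    obtain ⟨ha0, ha1, hb0, hb1⟩ := mIJ_bounds hn0 (k + 1)
    have hcell : PySem.List.pyGetD
        (PySem.List.pyGetD (gridAt n k) (mI n (k + 1)) []) (mJ n (k + 1)) 0 = 0 := by
      rw [gridAt_row ha0 ha1, PySem.List.pyGetD_map_pyRange_of_nonneg _ n _ 0 hb0 hb1,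
          mVal_mIJ hn0 (by omega) (by linarith), if_neg (show ¬ (k + 1 ≤ k) from by omega)]
    rw [if_pos hcell, gridAt_write hn0 (by omega) hk']
  · -- end of a run: the diagonal neighbour is occupied, drop down instead
    have hpB : p = n - 1 := by omega
    have hring1 : n * (q + 1) = n * q + n := by ring
    have hk2 : k = n * (q + 1) := by linarith
    have hq2 : q + 1 < n := by
      by_contra h
      push_neg at h
      have := mul_le_mul_of_nonneg_left h (le_of_lt hn0)
      linarith
    have hnq : 0 ≤ n * q := mul_nonneg (by omega) hq0
    have hdivB : k / n = q + 1 := by rw [hk2, Int.mul_ediv_cancel_left _ hne]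
    have hmodB : k % n = 0 := by rw [hk2, Int.mul_emod_right]
    have hIB1 : mI n (k + 1) = (2 * q + 2) % n := by
      unfold mI
      simp only [add_sub_cancel_right]
      rw [hdivB, hmodB, show 2 * (q + 1) - 0 = 2 * q + 2 from by ring]
    have hJB1 : mJ n (k + 1) = (n / 2 - q - 1) % n := by
      unfold mJ
      simp only [add_sub_cancel_right]
      rw [hdivB, hIB1,
          show q + 1 + n / 2 - (2 * q + 2) % n = (q + 1 + n / 2) - (2 * q + 2) % n from by ring,
          emod_shift_neg,
          show q + 1 + n / 2 - (2 * q + 2) = n / 2 - q - 1 from by ring]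
    have hIW : mI n (n * q + 1) = (2 * q) % n := by
      unfold mI
      simp only [add_sub_cancel_right]
      rw [Int.mul_ediv_cancel_left _ hne, Int.mul_emod_right,
          show 2 * q - 0 = 2 * q from by ring]
    have hJW : mJ n (n * q + 1) = (n / 2 - q) % n := by
      unfold mJ
      simp only [add_sub_cancel_right]
      rw [Int.mul_ediv_cancel_left _ hne, hIW,
          show q + n / 2 - (2 * q) % n = (q + n / 2) - (2 * q) % n from by ring,
          emod_shift_neg,
          show q + n / 2 - 2 * q = n / 2 - q from by ring]
    have hrowB : (mI n k - 1) % n = mI n (n * q + 1) := by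
      rw [hrowA, hIW, show 2 * q - p - 1 = 2 * q + n * (-1) from by omega,
          Int.add_mul_emod_self_left]
    have hcolB : (mJ n k + 1) % n = mJ n (n * q + 1) := by
      rw [hcolA, hJW, show n / 2 - q + p + 1 = (n / 2 - q) + n * 1 from by omega,
          Int.add_mul_emod_self_left]
    obtain ⟨hw0, hw1, hw2, hw3⟩ := mIJ_bounds hn0 (n * q + 1)
    have hwub : n * q ≤ n * (n - 1) := mul_le_mul_of_nonneg_left (by omega) (by omega)
    have hring2 : n * (n - 1) = n * n - n := by ring
    have hwv : mVal n (mI n (n * q + 1)) (mJ n (n * q + 1)) = n * q + 1 :=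
      mVal_mIJ hn0 (by omega) (by linarith)
    have hcell : PySem.List.pyGetD
        (PySem.List.pyGetD (gridAt n k) ((mI n k - 1) % n) []) ((mJ n k + 1) % n) 0
        = n * q + 1 := by
      rw [hrowB, hcolB, gridAt_row hw0 hw1, PySem.List.pyGetD_map_pyRange_of_nonneg _ n _ 0 hw2 hw3,
          hwv, if_pos (show n * q + 1 ≤ k from by linarith)]
    rw [hcell, if_neg (show ¬ (n * q + 1 = 0) from by omega)]
    rw [show ((mI n k - 1) % n + 2) % n = mI n (k + 1) from by
          rw [hrowB, hIW, emod_shift, hIB1],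
        show ((mJ n k + 1) % n - 1) % n = mJ n (k + 1) from by
          rw [hcolB, hJW, show (n / 2 - q) % n - 1 = (n / 2 - q) % n + (-1) from by ring,
              emod_shift, show n / 2 - q + (-1) = n / 2 - q - 1 from by ring, hJB1],
        gridAt_write hn0 (by omega) hk']

theorem loop_lemma {n : Int} (hn : 1 ≤ n) (t : Nat) (ht : (t : Int) ≤ n ^ 2 - 1) :
    (PySem.List.pyRange 2 (2 + (t : Int)) 1).foldl (modfillStep n) (gridAt n 1, mI n 1, mJ n 1)
      = (gridAt n (1 + t), mI n (1 + t), mJ n (1 + t)) := by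
  induction t with
  | zero =>
    rw [show (2 + ((0 : Nat) : Int)) = 2 from by norm_num,
        PySem.List.pyRange_one_eq_nil (le_refl 2)]
    norm_num
  | succ t ih =>
    have hc : ((t + 1 : Nat) : Int) = (t : Int) + 1 := by push_cast; ring
    rw [hc] at ht ⊢
    have hsq : n ^ 2 = n * n := sq n
    rw [show (2 : Int) + ((t : Int) + 1) = (2 + (t : Int)) + 1 from by ring,
        PySem.List.pyRange_one_succ_right (by omega), List.foldl_append,
        ih (by linarith), List.foldl_cons, List.foldl_nil,
        show (2 : Int) + (t : Int) = (1 + (t : Int)) + 1 from by ring,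
        step_lemma hn (by omega) (by linarith),
        show (1 : Int) + ((t : Int) + 1) = (1 + (t : Int)) + 1 from by ring]

-- ===== VERDICT (by name: the statement is the Claim_ definition above) =====
theorem init_lemma {n : Int} (hn : 1 ≤ n) :
    PySem.List.pySetD
        ((PySem.List.pyRange 0 n 1).map (fun _y => (PySem.List.pyRange 0 n 1).map (fun _x => (0 : Int))))
        0
        (PySem.List.pySetD
          (PySem.List.pyGetD
            ((PySem.List.pyRange 0 n 1).map (fun _y => (PySem.List.pyRange 0 n 1).map (fun _x => (0 : Int))))
            0 [])
          (n / 2) 1)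
      = gridAt n 1 := by
  have hn0 : 0 < n := by omega
  have hsq : n ^ 2 = n * n := sq n
  have hI1 : mI n 1 = 0 := by
    unfold mI; norm_num
  have hJ1 : mJ n 1 = n / 2 := by
    unfold mJ
    rw [hI1]
    norm_num
    exact Int.emod_eq_of_lt (by omega) (by omega)
  have h0 : gridAt n 0
      = (PySem.List.pyRange 0 n 1).map (fun _y => (PySem.List.pyRange 0 n 1).map (fun _x => (0 : Int))) := by
    unfold gridAt
    apply List.map_congr_left
    intro i _
    apply List.map_congr_left
    intro j hj
    obtain ⟨hj0, hj1⟩ : 0 ≤ j ∧ j < n := by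
      have := (PySem.List.mem_pyRange_one).mp hj
      omega
    rw [if_neg (by have := (mVal_bounds hn0 i j).1; omega)]
  have := gridAt_write (n := n) (k := 0) hn0 (le_refl 0) (by nlinarith)
  rw [show ((0 : Int) + 1) = 1 from by norm_num, hI1, hJ1, h0] at this
  exact this

theorem modfill_spec : Claim_equal_modfill := by
  intro size hdom hpre
  have hn : 1 ≤ size := hpre
  have hn0 : 0 < size := by omega
  have hsq : size ^ 2 = size * size := sq size
  have h1sq : 1 ≤ size ^ 2 := by nlinarith
  show modfill size = modfill_alt size
  simp only [modfill]
  rw [PySem.Int.floordiv_eq_ediv_of_pos (show (0 : Int) < 2 from by norm_num), init_lemma hn,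
      show size ^ 2 + 1 = 2 + (((size ^ 2 - 1).toNat : Int)) from by omega]
  have hI1 : mI size 1 = 0 := by unfold mI; norm_num
  have hJ1 : mJ size 1 = size / 2 := by
    unfold mJ
    rw [hI1]
    norm_num
    exact Int.emod_eq_of_lt (by omega) (by omega)
  rw [← hI1, ← hJ1]
  have hloop := loop_lemma (n := size) hn ((size ^ 2 - 1).toNat) (by omega)
  have h2 : (1 : Int) + ((size ^ 2 - 1).toNat : Int) = size ^ 2 := by omega
  rw [hloop, h2]
  unfold modfill_alt gridAt
  simp only [PySem.Int.mod_eq_emod_of_pos hn0,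
             PySem.Int.floordiv_eq_ediv_of_pos (show (0 : Int) < 2 from by norm_num)]
  apply List.map_congr_left
  intro i _
  apply List.map_congr_left
  intro j _
  rw [if_pos (mVal_bounds hn0 i j).2]
  unfold mVal
  rfl
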